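-- pv_equiv track=rewrite | github.com/btwooton/RosalindProblemSolutions | transition_transversion.py | num_transitions
-- ===== SOURCE A (Python) =====
-- def num_transitions(seq1, seq2):
--
--     """
--     Takes in two DNA strings and returns the number of
--     transition point mutations between the two sequences
--     The sequences are assumed to be of the same length
--     """
--
--     result = 0
--     i = 0
--
--     while i < len(seq1):
--         if seq1[i] == 'A' and seq2[i] == 'G':
--             result += 1
--         elif seq1[i] == 'G' and seq2[i] == 'A':
--             result += 1
--         elif seq1[i] == 'C' and seq2[i] == 'T':
--             result += 1
--         elif seq1[i] == 'T' and seq2[i] == 'C':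
--             result += 1
--         i += 1
--
--     return result
-- ===== SOURCE B (Python) =====
-- def num_transitions(seq1, seq2):
--     # Stage 1: histogram of aligned base pairs.
--     pair_counts = {}
--     for p in zip(seq1, seq2):
--         pair_counts[p] = pair_counts.get(p, 0) + 1
--     # Stage 2: a transition is exactly one of these four ordered pairs.
--     return (pair_counts.get(('A', 'G'), 0)
--             + pair_counts.get(('G', 'A'), 0)
--             + pair_counts.get(('C', 'T'), 0)
--             + pair_counts.get(('T', 'C'), 0))
-- ===== Notes on version B (the rewrite author's own statement) =====
-- stated objective: alternative
-- what changed: Replaces A's per-position branch-and-count while loop by two stages: build a histogram (dict) of aligned base pairs over zip(seq1, seq2), then return the sum of the counts of the four transition pairs; no per-position counting branches remain.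
-- outside the precondition, e.g. on num_transitions('A', ''): A raises IndexError, B returns 0
import Mathlib
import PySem

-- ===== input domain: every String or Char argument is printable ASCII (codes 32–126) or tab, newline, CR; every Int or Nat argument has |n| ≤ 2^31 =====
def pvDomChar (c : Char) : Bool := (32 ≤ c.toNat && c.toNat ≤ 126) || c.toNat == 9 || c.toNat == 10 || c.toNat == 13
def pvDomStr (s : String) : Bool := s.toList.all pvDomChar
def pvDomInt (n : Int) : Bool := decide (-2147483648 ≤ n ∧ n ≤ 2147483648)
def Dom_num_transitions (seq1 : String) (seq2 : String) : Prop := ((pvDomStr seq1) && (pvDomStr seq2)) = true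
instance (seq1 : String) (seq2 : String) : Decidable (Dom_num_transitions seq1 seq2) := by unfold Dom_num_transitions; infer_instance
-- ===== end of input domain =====

-- B replaces A's per-position branch-and-count loop by two stages: a histogram of the
-- aligned base pairs, then the sum of the four transition-pair counts (objective: alternative).

-- ===== PORT A =====
-- while loop of A: index recursion; l2.getD with a dummy default is only reached
-- where Python would raise IndexError, which Pre_ excludes.
def ntLoopA (l1 l2 : List Char) (i : Nat) (r : Int) : Int :=
  if _h : i < l1.length then
    ntLoopA l1 l2 (i + 1)
      (if l1.getD i '?' = 'A' ∧ l2.getD i '?' = 'G' then r + 1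
       else if l1.getD i '?' = 'G' ∧ l2.getD i '?' = 'A' then r + 1
       else if l1.getD i '?' = 'C' ∧ l2.getD i '?' = 'T' then r + 1
       else if l1.getD i '?' = 'T' ∧ l2.getD i '?' = 'C' then r + 1
       else r)
  else r
termination_by l1.length - i

def num_transitions (seq1 : String) (seq2 : String) : Int :=
  ntLoopA seq1.toList seq2.toList 0 0

-- ===== PORT B =====
def num_transitions_alt (seq1 : String) (seq2 : String) : Int :=
  let pair_counts :=
    (seq1.toList.zip seq2.toList).foldl
      (fun d p => d.modify p 0 (· + 1))
      (PySem.Dict.empty : PySem.Dict (Char × Char) Int)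
  pair_counts.getD ('A', 'G') 0
    + pair_counts.getD ('G', 'A') 0
    + pair_counts.getD ('C', 'T') 0
    + pair_counts.getD ('T', 'C') 0

-- ===== PRECONDITION & SPEC =====
-- Pre_ excludes exactly the inputs where A raises IndexError: a position i ≥ len(seq2)
-- whose seq1[i] is one of A/G/C/T (there A evaluates seq2[i]).
def Pre_num_transitions (seq1 : String) (seq2 : String) : Prop :=
  ((seq1.toList.drop seq2.toList.length).all
    (fun c => !(['A', 'G', 'C', 'T'] : List Char).contains c)) = true
instance (seq1 : String) (seq2 : String) : Decidable (Pre_num_transitions seq1 seq2) := by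
  unfold Pre_num_transitions; infer_instance

def pvWitness_num_transitions : String × String := ("ACGT", "GATC")

def Spec_num_transitions (seq1 : String) (seq2 : String) (out : Int) : Prop := out = num_transitions_alt seq1 seq2
instance (seq1 : String) (seq2 : String) (out : Int) : Decidable (Spec_num_transitions seq1 seq2 out) := by unfold Spec_num_transitions; infer_instance

-- ===== CLAIM (what is proved, stated in full; the proofs are below) =====
def Claim_equal_num_transitions : Prop := ∀ (seq1 : String) (seq2 : String), Dom_num_transitions seq1 seq2 → Pre_num_transitions seq1 seq2 → Spec_num_transitions seq1 seq2 (num_transitions seq1 seq2)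

-- ===== LEMMAS AND PROOFS =====

-- shifting the index of A's loop past a common head
lemma ntLoopA_shift (a b : Char) : ∀ n (l1 l2 : List Char) (i : Nat) (r : Int),
    l1.length - i = n → ntLoopA (a :: l1) (b :: l2) (i + 1) r = ntLoopA l1 l2 i r := by
  intro n
  induction n using Nat.strong_induction_on with
  | _ n ih =>
    intro l1 l2 i r hn
    conv_lhs => rw [ntLoopA]
    conv_rhs => rw [ntLoopA]
    by_cases h : i < l1.length
    · have h1 : i + 1 < l1.length + 1 := by omega
      simp only [List.length_cons, dif_pos h1, dif_pos h, List.getD_cons_succ]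
      exact ih (l1.length - (i + 1)) (by omega) l1 l2 (i + 1) _ rfl
    · have h1 : ¬ i + 1 < l1.length + 1 := by omega
      simp only [List.length_cons, dif_neg h1, dif_neg h]

-- A's loop on an exhausted seq2 returns r when the remaining seq1 chars are not bases
lemma ntLoopA_nil : ∀ n (l1 : List Char) (i : Nat) (r : Int),
    l1.length - i = n →
    (∀ c ∈ l1.drop i, c ∉ (['A', 'G', 'C', 'T'] : List Char)) →
    ntLoopA l1 [] i r = r := by
  intro n
  induction n using Nat.strong_induction_on with
  | _ n ih =>
    intro l1 i r hn hpre
    rw [ntLoopA]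
    by_cases h : i < l1.length
    · have hc : l1.getD i '?' ∈ l1.drop i := by
        have : l1.getD i '?' = l1[i] := List.getD_eq_getElem l1 '?' h
        rw [this]
        have : l1[i] = (l1.drop i)[0]'(by simp; omega) := by simp
        rw [this]; exact List.getElem_mem _
      have := hpre _ hc
      simp only [h, dif_pos]
      have hif : ∀ x : Char, (if x = 'A' ∧ ([] : List Char).getD i '?' = 'G' then r + 1
          else if x = 'G' ∧ ([] : List Char).getD i '?' = 'A' then r + 1
          else if x = 'C' ∧ ([] : List Char).getD i '?' = 'T' then r + 1
          else if x = 'T' ∧ ([] : List Char).getD i '?' = 'C' then r + 1 else r) = r := by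
        intro x; simp [List.getD]
      rw [hif]
      exact ih (l1.length - (i + 1)) (by omega) l1 (i + 1) r rfl
        (fun c hcm => hpre c (by
          have h2 : c ∈ (l1.drop i).drop 1 := by
            rw [List.drop_drop]; simpa [Nat.add_comm] using hcm
          exact List.mem_of_mem_drop h2))
    · simp [h]

set_option maxHeartbeats 1600000 in
-- A's loop counts exactly the occurrences of the four transition pairs in the zip.
lemma ntLoopA_eq_counts : ∀ (l1 l2 : List Char) (r : Int),
    (∀ c ∈ l1.drop l2.length, c ∉ (['A', 'G', 'C', 'T'] : List Char)) →
    ntLoopA l1 l2 0 r =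
      r + ((l1.zip l2).count ('A', 'G') + (l1.zip l2).count ('G', 'A')
         + (l1.zip l2).count ('C', 'T') + (l1.zip l2).count ('T', 'C') : Int) := by
  intro l1
  induction l1 with
  | nil => intro l2 r _; rw [ntLoopA]; simp
  | cons a t1 ih =>
    intro l2 r hpre
    cases l2 with
    | nil =>
      simp only [List.zip_nil_right, List.count_nil]
      have := ntLoopA_nil (a :: t1).length (a :: t1) 0 r (by omega) (by simpa using hpre)
      rw [this]; push_cast; ring
    | cons b t2 =>
      rw [ntLoopA]
      simp only [List.length_cons, Nat.zero_lt_succ, dif_pos, List.getD_cons_zero,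
        List.zip_cons_cons]
      rw [ntLoopA_shift a b t1.length t1 t2 0 _ (by omega)]
      rw [ih t2 _ (by simpa using hpre)]
      simp only [List.count_cons]
      by_cases h1 : a = 'A' <;> by_cases h2 : a = 'G' <;> by_cases h3 : a = 'C' <;>
        by_cases h4 : a = 'T' <;>
      by_cases g1 : b = 'A' <;> by_cases g2 : b = 'G' <;> by_cases g3 : b = 'C' <;>
        by_cases g4 : b = 'T' <;>
      simp_all <;> ring_nf

-- B's histogram lookups are the pair counts.
lemma histo_getD (l : List (Char × Char)) (p : Char × Char) :
    ((l.foldl (fun d q => d.modify q 0 (· + 1))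
        (PySem.Dict.empty : PySem.Dict (Char × Char) Int)).getD p 0 : Int) = l.count p := by
  rw [PySem.Dict.getD_foldl_modify_add_one]
  simp

-- ===== VERDICT (by name: the statement is the Claim_ definition above) =====
theorem num_transitions_spec : Claim_equal_num_transitions := by
  intro seq1 seq2 _ hpre
  unfold Pre_num_transitions at hpre
  simp only [List.all_eq_true] at hpre
  unfold Spec_num_transitions num_transitions num_transitions_alt
  simp only [histo_getD]
  rw [ntLoopA_eq_counts seq1.toList seq2.toList 0
    (fun c hc => by have := hpre c hc; simpa using this)]
  ring
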